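-- pv_equiv track=rewrite | github.com/Tokyo113/leetcode_python | 中级班/chapter1/code_04_ColorLeftRight.py | minPaint
-- ===== SOURCE A (Python) =====
-- def minPaint(str):
--     '''
--     暴力方法，O(N2)
--     :param str:
--     :return:
--     '''
--     if str is None or len(str)< 2:
--         return 0
--     minPaints = len(str)
--     for i in range(len(str)+1):
--         cnt = 0
--         for left in str[:i]:
--             if left != 'R':
--                 cnt += 1
--
--         for right in str[i:]:
--             if right != 'G':
--                 cnt += 1
--         minPaints = min(minPaints, cnt)
--     return minPaints
-- ===== SOURCE B (Python) =====
-- def minPaint(str):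
--     # One pass: cost(i) = (#non-'R' in str[:i]) + (#non-'G' in str[i:]).
--     # Start from cost(0) = #non-'G' and update incrementally while scanning.
--     if str is None or len(str) < 2:
--         return 0
--     nong = sum(1 for c in str if c != 'G')
--     run = nong
--     best = nong
--     for c in str:
--         run += (1 if c != 'R' else 0) - (1 if c != 'G' else 0)
--         if run < best:
--             best = run
--     return best
-- ===== Notes on version B (the rewrite author's own statement) =====
-- stated objective: faster
-- what changed: Replaces the O(n^2) re-count of every prefix/suffix per split point with a single pass that starts from the cost of split 0 (count of non-'G' characters) and updates the split cost incrementally while tracking the minimum.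
import Mathlib
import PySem

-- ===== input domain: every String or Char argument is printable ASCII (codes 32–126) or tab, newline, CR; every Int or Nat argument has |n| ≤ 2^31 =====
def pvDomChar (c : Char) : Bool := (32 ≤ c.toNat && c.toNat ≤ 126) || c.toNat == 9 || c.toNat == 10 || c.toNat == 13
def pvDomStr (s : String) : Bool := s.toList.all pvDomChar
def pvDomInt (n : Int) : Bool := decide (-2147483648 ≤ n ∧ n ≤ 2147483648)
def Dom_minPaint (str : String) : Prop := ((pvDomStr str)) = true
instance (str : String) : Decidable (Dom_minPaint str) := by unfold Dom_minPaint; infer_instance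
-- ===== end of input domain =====

-- B replaces A's O(n^2) recount of each prefix/suffix with one incremental pass (measured faster).

-- ===== PORT A =====
def minPaint (str : String) : Int :=
  if PySem.Str.len str < 2 then 0
  else
    (PySem.List.pyRange 0 (PySem.Str.len str + 1) 1).foldl
      (fun minPaints i =>
        let cnt : Int := (PySem.List.slice str.toList none (some i)).foldl
          (fun cnt left => if left ≠ 'R' then cnt + 1 else cnt) 0
        let cnt : Int := (PySem.List.slice str.toList (some i) none).foldl
          (fun cnt right => if right ≠ 'G' then cnt + 1 else cnt) cnt
        min minPaints cnt)
      (PySem.Str.len str)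

-- ===== PORT B =====
def minPaint_alt (str : String) : Int :=
  if PySem.Str.len str < 2 then 0
  else
    let nong : Int := str.toList.foldl (fun n c => if c ≠ 'G' then n + 1 else n) 0
    let p := str.toList.foldl
      (fun (rb : Int × Int) c =>
        let run := rb.1 + (if c ≠ 'R' then (1 : Int) else 0) - (if c ≠ 'G' then (1 : Int) else 0)
        (run, if run < rb.2 then run else rb.2))
      (nong, nong)
    p.2

-- ===== PRECONDITION & SPEC =====
def Spec_minPaint (str : String) (out : Int) : Prop := out = minPaint_alt str
instance (str : String) (out : Int) : Decidable (Spec_minPaint str out) := by unfold Spec_minPaint; infer_instance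

-- ===== CLAIM (what is proved, stated in full; the proofs are below) =====
def Claim_equal_minPaint : Prop := ∀ (str : String), Dom_minPaint str → Spec_minPaint str (minPaint str)

-- ===== LEMMAS AND PROOFS =====

-- non-'R' / non-'G' counts, as Int
def pvNR (l : List Char) : Int := (l.countP (fun c => c ≠ 'R') : Int)
def pvNG (l : List Char) : Int := (l.countP (fun c => c ≠ 'G') : Int)

-- common recursive form of the incremental scan
def pvM : Int → Int → List Char → Int
  | _, best, [] => best
  | run, best, ch :: t =>
      let run' := run + (if ch ≠ 'R' then 1 else 0) - (if ch ≠ 'G' then 1 else 0)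
      pvM run' (if run' < best then run' else best) t

lemma pvM_fold (l : List Char) (run best : Int) :
    (l.foldl
      (fun (rb : Int × Int) c =>
        let run := rb.1 + (if c ≠ 'R' then (1 : Int) else 0) - (if c ≠ 'G' then (1 : Int) else 0)
        (run, if run < rb.2 then run else rb.2))
      (run, best)).2 = pvM run best l := by
  induction l generalizing run best with
  | nil => rfl
  | cons ch t ih =>
    rw [List.foldl_cons]
    exact ih _ _

lemma pvNR_cons (ch : Char) (p : List Char) :
    pvNR (ch :: p) = (if ch ≠ 'R' then 1 else 0) + pvNR p := by
  simp only [pvNR, List.countP_cons]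
  push_cast
  split_ifs <;> simp_all <;> omega

lemma pvNG_cons (ch : Char) (p : List Char) :
    pvNG (ch :: p) = (if ch ≠ 'G' then 1 else 0) + pvNG p := by
  simp only [pvNG, List.countP_cons]
  push_cast
  split_ifs <;> simp_all <;> omega

lemma pvA_fold (l : List Char) (x best : Int) :
    (List.range l.length).foldl
      (fun m i => min m (x + pvNR (l.take (i + 1)) + pvNG (l.drop (i + 1)))) best
      = pvM (x + pvNG l) best l := by
  induction l generalizing x best with
  | nil => rfl
  | cons ch t ih =>
    rw [List.length_cons, List.range_succ_eq_map, List.foldl_cons, List.foldl_map]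
    have hbody :
        (fun (m : Int) (i : Nat) =>
            min m (x + pvNR ((ch :: t).take (Nat.succ i + 1)) + pvNG ((ch :: t).drop (Nat.succ i + 1))))
          = fun (m : Int) (i : Nat) =>
            min m ((x + (if ch ≠ 'R' then 1 else 0)) + pvNR (t.take (i + 1)) + pvNG (t.drop (i + 1))) := by
      funext m i
      rw [List.take_succ_cons, List.drop_succ_cons, pvNR_cons]
      split_ifs <;> omega
    have hhead : min best (x + pvNR ((ch :: t).take (0 + 1)) + pvNG ((ch :: t).drop (0 + 1)))
        = min best (x + (if ch ≠ 'R' then 1 else 0) + pvNG t) := by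
      rw [List.take_succ_cons, pvNR_cons]
      simp [pvNR]
    rw [hhead, hbody, ih]
    have hrun : x + pvNG (ch :: t) + (if ch ≠ 'R' then (1:Int) else 0) - (if ch ≠ 'G' then (1:Int) else 0)
        = x + (if ch ≠ 'R' then (1:Int) else 0) + pvNG t := by
      rw [pvNG_cons]; ring
    have hmin : (if (x + pvNG (ch :: t) + (if ch ≠ 'R' then (1:Int) else 0) - (if ch ≠ 'G' then (1:Int) else 0)) < best
          then x + pvNG (ch :: t) + (if ch ≠ 'R' then (1:Int) else 0) - (if ch ≠ 'G' then (1:Int) else 0)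
          else best)
        = min best (x + (if ch ≠ 'R' then (1:Int) else 0) + pvNG t) := by
      rw [hrun]
      split_ifs <;> omega
    conv_rhs => rw [pvM]
    rw [hmin, hrun]

lemma pvNG_le_len (l : List Char) : pvNG l ≤ (l.length : Int) := by
  simp only [pvNG, Int.ofNat_le]
  exact_mod_cast List.countP_le_length

-- ===== VERDICT (by name: the statement is the Claim_ definition above) =====
theorem minPaint_spec : Claim_equal_minPaint := by
  intro str _
  unfold Spec_minPaint minPaint minPaint_alt
  by_cases h : PySem.Str.len str < 2
  · rw [if_pos h, if_pos h]
  · rw [if_neg h, if_neg h]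
    set l := str.toList with hl
    have hlen : PySem.Str.len str = (l.length : Int) := by
      simp [PySem.Str.len_eq, hl]
    rw [hlen, pvM_fold]
    have hnong : l.foldl (fun n c => if c ≠ 'G' then n + 1 else n) (0 : Int) = pvNG l := by
      rw [PySem.List.foldl_ite_add_one]; simp [pvNG]
    rw [hnong]
    have hrange : PySem.List.pyRange 0 ((l.length : Int) + 1) 1
        = (List.range (l.length + 1)).map (fun k : Nat => (k : Int)) := by
      have h2 : (((l.length : Int) + 1 - 0)).toNat = l.length + 1 := by omega
      rw [PySem.List.pyRange_one, h2]
      simp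
    rw [hrange, List.foldl_map]
    have hbody :
        (fun (minPaints : Int) (i : Nat) =>
          min minPaints
            ((PySem.List.slice l (some (i : Int)) none).foldl
              (fun cnt right => if right ≠ 'G' then cnt + 1 else cnt)
              ((PySem.List.slice l none (some (i : Int))).foldl
                (fun cnt left => if left ≠ 'R' then cnt + 1 else cnt) 0)))
        = fun (m : Int) (i : Nat) => min m (0 + pvNR (l.take i) + pvNG (l.drop i)) := by
      funext m i
      rw [PySem.List.slice_to_natCast, PySem.List.slice_from_natCast,
        PySem.List.foldl_ite_add_one, PySem.List.foldl_ite_add_one]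
      simp [pvNR, pvNG]
    rw [hbody]
    rw [List.range_succ_eq_map, List.foldl_cons, List.foldl_map]
    have hhead : min (l.length : Int) (0 + pvNR (l.take 0) + pvNG (l.drop 0)) = pvNG l := by
      have h1 := pvNG_le_len l
      simp [pvNR]
      omega
    have hbody2 :
        (fun (m : Int) (i : Nat) => min m (0 + pvNR (l.take (Nat.succ i)) + pvNG (l.drop (Nat.succ i))))
        = fun (m : Int) (i : Nat) => min m ((0 : Int) + pvNR (l.take (i + 1)) + pvNG (l.drop (i + 1))) := by
      funext m i; rfl
    rw [hhead, hbody2, pvA_fold]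
    have : (0 : Int) + pvNG l = pvNG l := by ring
    rw [this]
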